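-- pv_equiv track=rewrite | github.com/ManuelLoaizaV/ine018-unmsm | tareas/2/24190311/PYTHON17.py | convertirAbuena
-- ===== SOURCE A (Python) =====
-- def convertirAbuena(s):
--     stack=[]
--     for char in s:
--         if stack and stack[-1].islower() and stack[-1].upper() == char:
--             stack.pop()
--         else:
--             stack.append(char)
--
--     return ''.join(stack)
-- ===== SOURCE B (Python) =====
-- def convertirAbuena(s):
--     # Fixpoint rewrite: repeatedly scan s, deleting every adjacent
--     # lowercase-then-its-uppercase pair found, until a pass deletes nothing.
--     changed = True
--     while changed:
--         changed = False
--         out = []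
--         i = 0
--         while i < len(s):
--             if i + 1 < len(s) and s[i].islower() and s[i].upper() == s[i + 1]:
--                 i += 2
--                 changed = True
--             else:
--                 out.append(s[i])
--                 i += 1
--         s = ''.join(out)
--     return s
-- ===== Notes on version B (the rewrite author's own statement) =====
-- stated objective: alternative
-- what changed: Replaces A's single-pass stack by a fixpoint rewrite: repeatedly rebuild the string in left-to-right passes that delete each adjacent lowercase-then-its-uppercase pair, stopping when a full pass deletes nothing; equal because qualifying pairs never overlap, so the rewrite system is confluent and reaches A's normal form.
import Mathlib
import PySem

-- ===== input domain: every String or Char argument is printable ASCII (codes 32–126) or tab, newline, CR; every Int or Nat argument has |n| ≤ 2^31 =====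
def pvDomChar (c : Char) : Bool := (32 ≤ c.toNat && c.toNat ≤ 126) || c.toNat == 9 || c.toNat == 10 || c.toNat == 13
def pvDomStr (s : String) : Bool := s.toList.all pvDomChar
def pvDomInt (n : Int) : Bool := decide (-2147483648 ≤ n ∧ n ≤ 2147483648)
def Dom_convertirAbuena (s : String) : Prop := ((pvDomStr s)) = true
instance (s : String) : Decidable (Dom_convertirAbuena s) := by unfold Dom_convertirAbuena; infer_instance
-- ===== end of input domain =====

-- B replaces A's single-pass stack by a fixpoint rewrite: repeated full passes that delete
-- adjacent lowercase-then-its-uppercase pairs until a pass deletes nothing (objective: alternative).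

-- ===== PORT A =====
-- one loop step of A: pop when the stack top is lowercase and the char is its uppercase
def pvStepA (stack : List Char) (char : Char) : List Char :=
  match stack with
  | top :: rest =>
      if PySem.Chars.islower top = true ∧ PySem.Chars.upperChar top = char then rest
      else char :: top :: rest
  | [] => [char]

def convertirAbuena (s : String) : String :=
  String.ofList ((s.toList.foldl pvStepA []).reverse)

-- ===== PORT B =====
-- one full pass of B's inner while loop: delete each adjacent cancelling pair found,
-- returning the rebuilt list and the `changed` flag
def pvPass : List Char → List Char × Bool
  | [] => ([], false)
  | [a] => ([a], false)
  | a :: b :: rest =>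
      if PySem.Chars.islower a = true ∧ PySem.Chars.upperChar a = b then
        ((pvPass rest).1, true)
      else
        ((a :: (pvPass (b :: rest)).1), (pvPass (b :: rest)).2)
  termination_by l => l.length

-- B's outer while loop: repeat passes while `changed`; fuel length+1 suffices since a
-- changed pass removes at least two characters
def pvLoopB : Nat → List Char → List Char
  | 0, l => l
  | Nat.succ n, l => if (pvPass l).2 then pvLoopB n (pvPass l).1 else (pvPass l).1

def convertirAbuena_alt (s : String) : String :=
  String.ofList (pvLoopB (s.toList.length + 1) s.toList)

-- ===== PRECONDITION & SPEC =====
def Spec_convertirAbuena (s : String) (out : String) : Prop := out = convertirAbuena_alt s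
instance (s : String) (out : String) : Decidable (Spec_convertirAbuena s out) := by unfold Spec_convertirAbuena; infer_instance

-- ===== CLAIM (what is proved, stated in full; the proofs are below) =====
def Claim_equal_convertirAbuena : Prop := ∀ (s : String), Dom_convertirAbuena s → Spec_convertirAbuena s (convertirAbuena s)

-- ===== LEMMAS AND PROOFS =====

theorem pvCharLeIff (a b : Char) : a ≤ b ↔ a.toNat ≤ b.toNat := by
  rw [Char.le_def, UInt32.le_iff_toNat_le]; rfl

-- the uppercase counterpart of a lowercase char is never itself lowercase
theorem pvLowerUpper (c : Char) (h : PySem.Chars.islower c = true) :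
    PySem.Chars.islower (PySem.Chars.upperChar c) = false := by
  have ha : ('a' : Char).toNat = 97 := rfl
  have hz : ('z' : Char).toNat = 122 := rfl
  simp only [PySem.Chars.upperChar, h, if_true]
  simp only [PySem.Chars.islower, Bool.and_eq_true, decide_eq_true_eq, pvCharLeIff, ha, hz] at h
  simp only [PySem.Chars.islower, Bool.and_eq_false_iff, decide_eq_false_iff_not, pvCharLeIff, ha, hz]
  left
  have h32 : (Char.ofNat (c.toNat - 32)).toNat = c.toNat - 32 := by
    rw [Char.toNat_ofNat]
    have : (c.toNat - 32).isValidChar := Or.inl (by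
      show c.toNat - 32 < 55296
      omega)
    simp [this]
  rw [h32]
  omega

-- a lowercase char never pops A's stack
theorem pvStepA_push (acc : List Char) (a : Char) (ha : PySem.Chars.islower a = true) :
    pvStepA acc a = a :: acc := by
  match acc with
  | [] => rfl
  | top :: rest =>
    simp only [pvStepA]
    rw [if_neg]
    intro ⟨h1, h2⟩
    rw [← h2] at ha
    rw [pvLowerUpper top h1] at ha
    exact Bool.false_ne_true ha

-- "no adjacent cancelling pair": the normal-form predicate between neighbours
def pvOk (a b : Char) : Prop :=
  ¬ (PySem.Chars.islower a = true ∧ PySem.Chars.upperChar a = b)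

-- folding A's step over a string with no cancelling pair never pops
theorem pvFoldA_normal :
    ∀ (l acc : List Char), List.IsChain pvOk (acc.reverse ++ l) →
      List.foldl pvStepA acc l = l.reverse ++ acc := by
  intro l
  induction l with
  | nil => intro acc _; rfl
  | cons c l ih =>
    intro acc hch
    have hstep : pvStepA acc c = c :: acc := by
      match acc with
      | [] => rfl
      | top :: rest =>
        have hj : pvOk top c := by
          rw [List.isChain_append] at hch
          refine hch.2.2 top ?_ c rfl
          simp
        simp only [pvStepA]
        rw [if_neg hj]
    have hch' : List.IsChain pvOk ((c :: acc).reverse ++ l) := by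
      simpa using hch
    calc List.foldl pvStepA acc (c :: l)
        = List.foldl pvStepA (c :: acc) l := by rw [List.foldl_cons, hstep]
      _ = l.reverse ++ (c :: acc) := ih (c :: acc) hch'
      _ = (c :: l).reverse ++ acc := by simp

-- one pass of B does not change A's fold result
theorem pvFoldA_pass :
    ∀ (l : List Char), ∀ (acc : List Char),
      List.foldl pvStepA acc (pvPass l).1 = List.foldl pvStepA acc l := by
  intro l
  induction l using pvPass.induct with
  | case1 => intro acc; simp [pvPass]
  | case2 a => intro acc; simp [pvPass]
  | case3 a b rest hcond ih =>
    intro acc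
    have h1 : pvStepA acc a = a :: acc := pvStepA_push acc a hcond.1
    have h2 : pvStepA (a :: acc) b = acc := by
      simp only [pvStepA]
      rw [if_pos hcond]
    simp only [pvPass, if_pos hcond]
    rw [ih acc, List.foldl_cons, List.foldl_cons, h1, h2]
  | case4 a b rest hcond ih =>
    intro acc
    simp only [pvPass, if_neg hcond]
    rw [List.foldl_cons, ih (pvStepA acc a), List.foldl_cons]
    rfl

-- a pass that deletes nothing returns its input unchanged
theorem pvPass_unchanged :
    ∀ (l : List Char), (pvPass l).2 = false → (pvPass l).1 = l := by
  intro l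
  induction l using pvPass.induct with
  | case1 => intro _; simp [pvPass]
  | case2 a => intro _; simp [pvPass]
  | case3 a b rest hcond ih =>
    simp [pvPass, if_pos hcond]
  | case4 a b rest hcond ih =>
    intro h
    simp only [pvPass, if_neg hcond] at h ⊢
    rw [ih h]

-- a pass that deletes nothing certifies the input is in normal form
theorem pvPass_normal :
    ∀ (l : List Char), (pvPass l).2 = false → List.IsChain pvOk l := by
  intro l
  induction l using pvPass.induct with
  | case1 => intro _; exact List.isChain_nil
  | case2 a => intro _; exact List.isChain_singleton a
  | case3 a b rest hcond ih =>
    simp [pvPass, if_pos hcond]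
  | case4 a b rest hcond ih =>
    intro h
    simp only [pvPass, if_neg hcond] at h
    exact List.isChain_cons_cons.mpr ⟨hcond, ih h⟩

-- a pass that deletes something shrinks the list
theorem pvPass_shrink :
    ∀ (l : List Char), (pvPass l).1.length ≤ l.length ∧
      ((pvPass l).2 = true → (pvPass l).1.length < l.length) := by
  intro l
  induction l using pvPass.induct with
  | case1 => refine ⟨by simp [pvPass], by intro h; simp [pvPass] at h⟩
  | case2 a => refine ⟨by simp [pvPass], by intro h; simp [pvPass] at h⟩
  | case3 a b rest hcond ih =>
    have h1 := ih.1
    simp only [pvPass, if_pos hcond]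
    refine ⟨?_, fun _ => ?_⟩ <;> simp only [List.length_cons] <;> omega
  | case4 a b rest hcond ih =>
    obtain ⟨h1, h2⟩ := ih
    simp only [List.length_cons] at h1
    simp only [pvPass, if_neg hcond]
    constructor
    · simp only [List.length_cons]; omega
    · intro h
      have := h2 h
      simp only [List.length_cons] at this ⊢
      omega

-- B's loop does not change A's fold result
theorem pvFoldA_loop :
    ∀ (fuel : Nat) (l acc : List Char),
      List.foldl pvStepA acc (pvLoopB fuel l) = List.foldl pvStepA acc l := by
  intro fuel
  induction fuel with
  | zero => intro l acc; rfl
  | succ n ih =>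
    intro l acc
    simp only [pvLoopB]
    split
    · rw [ih (pvPass l).1 acc, pvFoldA_pass l acc]
    · exact pvFoldA_pass l acc
-- with enough fuel, B's loop result is in normal form
theorem pvLoopB_normal :
    ∀ (fuel : Nat) (l : List Char), l.length < fuel → List.IsChain pvOk (pvLoopB fuel l) := by
  intro fuel
  induction fuel with
  | zero => intro l h; omega
  | succ n ih =>
    intro l h
    simp only [pvLoopB]
    split
    · rename_i hch
      exact ih (pvPass l).1 (by have := (pvPass_shrink l).2 hch; omega)
    · rename_i hch
      rw [pvPass_unchanged l (by simpa using hch)]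
      exact pvPass_normal l (by simpa using hch)

-- ===== VERDICT (by name: the statement is the Claim_ definition above) =====
theorem convertirAbuena_spec : Claim_equal_convertirAbuena := by
  intro s _
  show convertirAbuena s = convertirAbuena_alt s
  unfold convertirAbuena convertirAbuena_alt
  have hnf : List.IsChain pvOk (pvLoopB (s.toList.length + 1) s.toList) :=
    pvLoopB_normal (s.toList.length + 1) s.toList (by omega)
  have h := pvFoldA_loop (s.toList.length + 1) s.toList []
  rw [pvFoldA_normal _ [] (by simpa using hnf)] at h
  rw [← h]
  simp
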